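-- pv_equiv track=rewrite | github.com/maoluois/pythonProject | exam_lesson/lesson1.py | judge_subsequence1
-- ===== SOURCE A (Python) =====
-- def judge_subsequence1(sequence,input_str):
--     result = []
--     sub_result = []
--
--     for i in range(len(sequence)):
--
--         if sequence[i] in result:
--             continue
--
--         if sequence[i] in input_str:
--             result.append(sequence[i])
--
--     for j in range(len(input_str)):
--         sub_result.append(input_str[j])
--
--
--     if sub_result == result:   #??为啥有黄线
--
--         return 'yes'
--
--     else:
--         return 'no'
-- ===== SOURCE B (Python) =====
-- def judge_subsequence1(sequence, input_str):
--     seen = []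
--     pos = 0
--     for c in sequence:
--         if c in seen or c not in input_str:
--             continue
--         if pos >= len(input_str) or input_str[pos] != c:
--             return 'no'
--         seen.append(c)
--         pos += 1
--     return 'yes' if pos == len(input_str) else 'no'
-- ===== Notes on version B (the rewrite author's own statement) =====
-- stated objective: simpler
-- what changed: B verifies incrementally with a pointer into input_str during a single pass over sequence (returning 'no' at the first mismatch), instead of building both the filtered-dedup list and a character-by-character copy of input_str and comparing the two lists at the end.
import Mathlib
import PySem

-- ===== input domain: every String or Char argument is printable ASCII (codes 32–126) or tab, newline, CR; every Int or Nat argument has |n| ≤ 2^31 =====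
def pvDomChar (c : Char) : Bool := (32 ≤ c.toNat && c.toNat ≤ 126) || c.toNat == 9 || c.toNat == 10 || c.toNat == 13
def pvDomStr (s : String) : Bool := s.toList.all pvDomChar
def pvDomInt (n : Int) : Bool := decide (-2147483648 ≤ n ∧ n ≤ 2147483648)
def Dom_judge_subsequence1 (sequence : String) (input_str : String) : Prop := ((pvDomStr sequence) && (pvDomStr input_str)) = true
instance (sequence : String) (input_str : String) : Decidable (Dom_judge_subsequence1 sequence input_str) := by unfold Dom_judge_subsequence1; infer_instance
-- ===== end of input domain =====

-- B is a simpler single-pass check: a pointer into input_str verifies the filtered-dedup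
-- sequence incrementally (early 'no' on first mismatch) instead of building two lists and
-- comparing them at the end.

-- ===== PORT A =====
-- step of A's first loop: skip duplicates, append chars occurring in input_str
def judgeStepA (inp : List Char) (r : List Char) (c : Char) : List Char :=
  if c ∈ r then r else if c ∈ inp then r ++ [c] else r

def judge_subsequence1 (sequence : String) (input_str : String) : String :=
  let inp := input_str.toList
  let result := sequence.toList.foldl (judgeStepA inp) []
  let sub_result := inp.foldl (fun s c => s ++ [c]) []
  if sub_result = result then "yes" else "no"

-- ===== PORT B =====
def judgeGoB (inp : List Char) (chars : List Char) (seen : List Char) (pos : Nat) : String :=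
  match chars with
  | [] => if pos = inp.length then "yes" else "no"
  | c :: rest =>
    if c ∈ seen ∨ c ∉ inp then judgeGoB inp rest seen pos
    else if pos ≥ inp.length ∨ inp[pos]? ≠ some c then "no"
    else judgeGoB inp rest (seen ++ [c]) (pos + 1)

def judge_subsequence1_alt (sequence : String) (input_str : String) : String :=
  judgeGoB input_str.toList sequence.toList [] 0

-- ===== PRECONDITION & SPEC =====
def Spec_judge_subsequence1 (sequence : String) (input_str : String) (out : String) : Prop := out = judge_subsequence1_alt sequence input_str
instance (sequence : String) (input_str : String) (out : String) : Decidable (Spec_judge_subsequence1 sequence input_str out) := by unfold Spec_judge_subsequence1; infer_instance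

-- ===== CLAIM (what is proved, stated in full; the proofs are below) =====
def Claim_equal_judge_subsequence1 : Prop := ∀ (sequence : String) (input_str : String), Dom_judge_subsequence1 sequence input_str → Spec_judge_subsequence1 sequence input_str (judge_subsequence1 sequence input_str)

-- ===== LEMMAS AND PROOFS =====

lemma foldl_append_id (l acc : List Char) : l.foldl (fun s c => s ++ [c]) acc = acc ++ l := by
  induction l generalizing acc with
  | nil => simp
  | cons c rest ih => simp [List.foldl, ih]

lemma foldl_stepA_prefix (inp : List Char) (l : List Char) :
    ∀ s, s <+: l.foldl (judgeStepA inp) s := by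
  induction l with
  | nil => intro s; simp
  | cons c rest ih =>
    intro s
    refine List.IsPrefix.trans ?_ (ih (judgeStepA inp s c))
    unfold judgeStepA
    split_ifs <;> simp

lemma goB_eq (inp : List Char) :
    ∀ (chars seen : List Char) (pos : Nat), pos ≤ inp.length → seen = inp.take pos →
      judgeGoB inp chars seen pos =
        (if inp = chars.foldl (judgeStepA inp) seen then "yes" else "no") := by
  intro chars
  induction chars with
  | nil =>
    intro seen pos hle hseen
    simp only [judgeGoB, List.foldl]
    by_cases h : pos = inp.length
    · subst h
      simp [hseen]
    · have : inp ≠ seen := by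
        intro he
        apply h
        have := congrArg List.length he
        simp [hseen, Nat.min_eq_left hle] at this; omega
      simp [h, this]
  | cons c rest ih =>
    intro seen pos hle hseen
    by_cases hskip : c ∈ seen ∨ c ∉ inp
    · have hstep : judgeStepA inp seen c = seen := by
        unfold judgeStepA
        rcases hskip with h | h
        · simp [h]
        · by_cases h2 : c ∈ seen <;> simp [h, h2]
      simp only [judgeGoB, hskip, if_true, List.foldl, hstep]
      exact ih seen pos hle hseen
    · push_neg at hskip
      obtain ⟨hns, hin⟩ := hskip
      have hstep : judgeStepA inp seen c = seen ++ [c] := by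
        unfold judgeStepA; simp [hns, hin]
      have hlt : pos < inp.length := by
        rcases Nat.lt_or_eq_of_le hle with h | h
        · exact h
        · exfalso
          apply hns
          rw [hseen, h, List.take_length]
          exact hin
      by_cases hfail : inp[pos]? ≠ some c
      · -- mismatch: B returns "no"; A's result can never equal inp
        have hnoA : inp ≠ (c :: rest).foldl (judgeStepA inp) seen := by
          intro he
          have hpre : (seen ++ [c]) <+: inp := by
            rw [he]
            simpa [List.foldl, hstep] using foldl_stepA_prefix inp rest (seen ++ [c])
          have := List.prefix_iff_eq_take.mp hpre
          have hlen : (seen ++ [c]).length = pos + 1 := by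
            simp [hseen, Nat.min_eq_left (Nat.le_of_lt hlt)]
          rw [hlen] at this
          have htake : inp.take (pos + 1) = inp.take pos ++ [inp[pos]] := by
            simpa using (List.take_concat_get inp pos hlt).symm
          rw [htake, ← hseen] at this
          have : c = inp[pos] := by
            simpa using congrArg (fun l => l.getLast? ) this
          apply hfail
          rw [List.getElem?_eq_getElem hlt, this]
        have hcond : ¬ (c ∈ seen ∨ c ∉ inp) := by push_neg; exact ⟨hns, hin⟩
        simp only [judgeGoB]
        rw [if_neg hcond, if_pos (Or.inr hfail), if_neg hnoA]
      · -- success: pointer advances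
        push_neg at hfail
        simp only [judgeGoB]
        have hcond : ¬ (c ∈ seen ∨ c ∉ inp) := by push_neg; exact ⟨hns, hin⟩
        rw [if_neg hcond]
        have hnofail : ¬ (pos ≥ inp.length ∨ inp[pos]? ≠ some c) := by
          push_neg
          exact ⟨hlt, hfail⟩
        rw [if_neg hnofail]
        have hseen' : seen ++ [c] = inp.take (pos + 1) := by
          have htake : inp.take (pos + 1) = inp.take pos ++ [inp[pos]] := by
            simpa using (List.take_concat_get inp pos hlt).symm
          have hc : inp[pos] = c := by
            have := hfail
            rw [List.getElem?_eq_getElem hlt] at this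
            exact Option.some.inj this
          rw [htake, hc, ← hseen]
        rw [ih (seen ++ [c]) (pos + 1) hlt hseen']
        simp [List.foldl, hstep]

-- ===== VERDICT (by name: the statement is the Claim_ definition above) =====
theorem judge_subsequence1_spec : Claim_equal_judge_subsequence1 := by
  intro sequence input_str _
  unfold Spec_judge_subsequence1 judge_subsequence1 judge_subsequence1_alt
  rw [goB_eq input_str.toList sequence.toList [] 0 (Nat.zero_le _) (by simp)]
  simp only [foldl_append_id, List.nil_append]
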